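-- pv_equiv track=rewrite | github.com/pypi-data/pypi-mirror-272 | packages/appunti/appunti-1.3.0.tar.gz/appunti-1.3.0/appunti/zettelkasten/sql.py | _assemble_templated_query
-- ===== SOURCE A (Python) =====
-- def _assemble_templated_query(
--         table_name: str, column_name: str,
--         column_values: list[str]) -> tuple[str, list[str]]:
--     query_template = "SELECT zk_id FROM {} WHERE zk_id IN ({})"
--     query = f"SELECT zk_id from {table_name}"
--     payload: list[str] = []
--     for element in column_values:
--         query = query_template.format(table_name, query)
--         if element.startswith("!"):
--             query += f" AND zk_id NOT IN (SELECT zk_id FROM {table_name} WHERE {column_name} LIKE ?)"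
--             payload.append(element.removeprefix("!"))
--         else:
--             query += f" AND {column_name} LIKE ?"
--             payload.append(element)
--
--     return query, payload
-- ===== SOURCE B (Python) =====
-- def _assemble_templated_query(
--         table_name: str, column_name: str,
--         column_values: list[str]) -> tuple[str, list[str]]:
--     payload: list[str] = []
--     sufs: list[str] = []
--     for element in column_values:
--         if element.startswith("!"):
--             payload.append(element[1:])
--             sufs.append(f") AND zk_id NOT IN (SELECT zk_id FROM {table_name} WHERE {column_name} LIKE ?)")
--         else:
--             payload.append(element)
--             sufs.append(f") AND {column_name} LIKE ?")
--     prefix = f"SELECT zk_id FROM {table_name} WHERE zk_id IN ("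
--     query = prefix * len(column_values) + f"SELECT zk_id from {table_name}" + "".join(sufs)
--     return query, payload
-- ===== Notes on version B (the rewrite author's own statement) =====
-- stated objective: faster
-- what changed: Replaces A's iterative re-wrapping of the growing query string (re-formatting the whole query each iteration, quadratic in the output size) with a closed-form assembly: one pass collects the payload and per-element suffix strings, and the final query is the fixed prefix repeated len(column_values) times, the base clause, and the joined suffixes, built in linear time.
import Mathlib
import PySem

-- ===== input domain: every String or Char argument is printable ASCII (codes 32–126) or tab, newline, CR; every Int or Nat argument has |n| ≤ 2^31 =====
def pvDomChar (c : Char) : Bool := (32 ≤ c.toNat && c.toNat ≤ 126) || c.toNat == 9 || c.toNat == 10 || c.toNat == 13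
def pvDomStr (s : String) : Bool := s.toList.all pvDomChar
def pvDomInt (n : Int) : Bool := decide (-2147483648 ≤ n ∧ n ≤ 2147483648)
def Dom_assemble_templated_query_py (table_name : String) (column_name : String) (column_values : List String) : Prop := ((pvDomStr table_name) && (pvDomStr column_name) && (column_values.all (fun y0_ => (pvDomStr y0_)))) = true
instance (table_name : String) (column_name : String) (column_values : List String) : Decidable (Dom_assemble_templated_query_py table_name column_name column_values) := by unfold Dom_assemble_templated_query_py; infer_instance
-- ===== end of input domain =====

-- B replaces A's iterative query re-wrapping by a closed-form assembly: one pass collects payload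
-- and per-element suffix strings, and the query is the prefix repeated n times ++ base ++ joined
-- suffixes (objective: faster — linear assembly instead of re-copying the query each iteration).

-- ===== PORT A =====
-- loop body of A: query_template.format(table_name, query), then the if/else.
-- element.removeprefix("!") under the startswith("!") guard is exactly element[1:] (Str.slice 1 none).
def pvAStep (table_name : String) (column_name : String)
    (st : String × List String) (element : String) : String × List String :=
  let query := "SELECT zk_id FROM " ++ table_name ++ " WHERE zk_id IN (" ++ st.1 ++ ")"
  if PySem.Str.startswith element "!" then
    (query ++ " AND zk_id NOT IN (SELECT zk_id FROM " ++ table_name ++ " WHERE " ++ column_name ++ " LIKE ?)",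
     st.2 ++ [PySem.Str.slice element (some 1) none])
  else
    (query ++ " AND " ++ column_name ++ " LIKE ?", st.2 ++ [element])

def assemble_templated_query_py (table_name : String) (column_name : String) (column_values : List String) : String × List String :=
  column_values.foldl (pvAStep table_name column_name)
    ("SELECT zk_id from " ++ table_name, [])

-- ===== PORT B =====
-- per-element (payload entry, suffix string) of Source B's single pass; element[1:] = Str.slice 1 none
def pvBItem (table_name : String) (column_name : String) (element : String) : String × String :=
  if PySem.Str.startswith element "!" then
    (PySem.Str.slice element (some 1) none,
     ") AND zk_id NOT IN (SELECT zk_id FROM " ++ table_name ++ " WHERE " ++ column_name ++ " LIKE ?)")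
  else
    (element, ") AND " ++ column_name ++ " LIKE ?")

-- prefix * n is String.join (List.replicate n prefix); "".join(sufs) is String.join sufs (both exact)
def assemble_templated_query_py_alt (table_name : String) (column_name : String) (column_values : List String) : String × List String :=
  let items := column_values.map (pvBItem table_name column_name)
  let prefixStr := "SELECT zk_id FROM " ++ table_name ++ " WHERE zk_id IN ("
  let query := String.join (List.replicate column_values.length prefixStr)
      ++ ("SELECT zk_id from " ++ table_name)
      ++ String.join (items.map Prod.snd)
  (query, items.map Prod.fst)

-- ===== PRECONDITION & SPEC =====
def Spec_assemble_templated_query_py (table_name : String) (column_name : String) (column_values : List String) (out : String × List String) : Prop := out = assemble_templated_query_py_alt table_name column_name column_values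
instance (table_name : String) (column_name : String) (column_values : List String) (out : String × List String) : Decidable (Spec_assemble_templated_query_py table_name column_name column_values out) := by unfold Spec_assemble_templated_query_py; infer_instance

-- ===== CLAIM (what is proved, stated in full; the proofs are below) =====
def Claim_equal_assemble_templated_query_py : Prop := ∀ (table_name : String) (column_name : String) (column_values : List String), Dom_assemble_templated_query_py table_name column_name column_values → Spec_assemble_templated_query_py table_name column_name column_values (assemble_templated_query_py table_name column_name column_values)

-- ===== LEMMAS AND PROOFS =====

lemma pvJoin_cons (s : String) (l : List String) :
    String.join (s :: l) = s ++ String.join l := by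
  have shift : ∀ (l : List String) (a : String),
      List.foldl (· ++ ·) a l = a ++ List.foldl (· ++ ·) "" l := by
    intro l
    induction l with
    | nil => intro a; simp [List.foldl]
    | cons x r ih =>
      intro a
      simp only [List.foldl]
      rw [ih (a ++ x), ih ("" ++ x), String.empty_append, String.append_assoc]
  simp only [String.join, List.foldl]
  rw [shift l ("" ++ s), String.empty_append]

-- pulling one prefix copy out of / past the joined replicate block
lemma pvComm (t : String) (n : Nat) (X : String) :
    String.join (List.replicate n ("SELECT zk_id FROM " ++ (t ++ " WHERE zk_id IN (")))
        ++ ("SELECT zk_id FROM " ++ (t ++ (" WHERE zk_id IN (" ++ X)))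
      = "SELECT zk_id FROM " ++ (t ++ (" WHERE zk_id IN ("
        ++ (String.join (List.replicate n ("SELECT zk_id FROM " ++ (t ++ " WHERE zk_id IN (")))
             ++ X))) := by
  induction n generalizing X with
  | zero => simp [String.join]
  | succ n ih =>
    simp only [List.replicate_succ, pvJoin_cons, String.append_assoc]
    rw [ih]

-- merging two adjacent string literals in right-associated form
lemma pvLit1 (Y : String) :
    (")" : String) ++ (" AND zk_id NOT IN (SELECT zk_id FROM " ++ Y)
      = ") AND zk_id NOT IN (SELECT zk_id FROM " ++ Y := by
  rw [← String.append_assoc]; congr 1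

lemma pvLit2 (Y : String) :
    (")" : String) ++ (" AND " ++ Y) = ") AND " ++ Y := by
  rw [← String.append_assoc]; congr 1

lemma pvFold_eq (t c : String) (vs : List String) (q : String) (pay : List String) :
    vs.foldl (pvAStep t c) (q, pay) =
      (String.join (List.replicate vs.length ("SELECT zk_id FROM " ++ t ++ " WHERE zk_id IN ("))
         ++ q ++ String.join ((vs.map (pvBItem t c)).map Prod.snd),
       pay ++ (vs.map (pvBItem t c)).map Prod.fst) := by
  induction vs generalizing q pay with
  | nil => simp [String.join]
  | cons e rest ih =>
    simp only [List.foldl_cons, List.map_cons, List.length_cons, List.replicate_succ,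
      pvJoin_cons]
    rw [pvAStep, pvBItem]
    split_ifs with h
    · rw [ih]
      refine Prod.ext ?_ ?_
      · simp only [String.append_assoc]
        rw [pvComm, pvLit1]
      · simp
    · rw [ih]
      refine Prod.ext ?_ ?_
      · simp only [String.append_assoc]
        rw [pvComm, pvLit2]
      · simp

-- ===== VERDICT (by name: the statement is the Claim_ definition above) =====
theorem assemble_templated_query_py_spec : Claim_equal_assemble_templated_query_py := by
  intro t c vs _
  unfold Spec_assemble_templated_query_py assemble_templated_query_py assemble_templated_query_py_alt
  rw [pvFold_eq]
  simp
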